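-- pv_equiv track=rewrite | github.com/llllllllll/slider | slider/curve.py | split_at_dupes
-- ===== SOURCE A (Python) =====
-- def split_at_dupes(inp):
--     out = []
--     oldi = 0
--     for i in range(1, len(inp)):
--         if inp[i] == inp[i - 1]:
--             out.append(inp[oldi:i])
--             oldi = i
--     out.append(inp[oldi:])
--     return out
-- ===== SOURCE B (Python) =====
-- def split_at_dupes(inp):
--     done = []
--     cur = []
--     for x in inp:
--         if cur and cur[-1] == x:
--             done.append(cur)
--             cur = [x]
--         else:
--             cur.append(x)
--     done.append(cur)
--     return done
-- ===== Notes on version B (the rewrite author's own statement) =====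
-- stated objective: alternative
-- what changed: A tracks a start index oldi and emits segments by slicing inp[oldi:i]; B never uses indices or slices at all: it builds each run directly, appending elements to the current run and closing it when the incoming element equals the run's last element.
import Mathlib
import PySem

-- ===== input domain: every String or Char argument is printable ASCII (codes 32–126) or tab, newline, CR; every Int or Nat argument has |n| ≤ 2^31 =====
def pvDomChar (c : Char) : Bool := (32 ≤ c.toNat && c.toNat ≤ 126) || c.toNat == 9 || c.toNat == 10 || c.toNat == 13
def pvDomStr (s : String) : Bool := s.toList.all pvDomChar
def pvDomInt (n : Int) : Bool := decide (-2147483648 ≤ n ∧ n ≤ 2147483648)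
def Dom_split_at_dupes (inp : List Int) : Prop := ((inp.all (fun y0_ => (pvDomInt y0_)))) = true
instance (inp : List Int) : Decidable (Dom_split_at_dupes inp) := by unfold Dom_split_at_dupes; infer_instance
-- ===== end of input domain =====

-- B replaces A's start-index bookkeeping and slicing by direct run accumulation
-- (append each element to the current run, close the run at a duplicate); same cost.

-- ===== PORT A =====
def split_at_dupes (inp : List Int) : List (List Int) :=
  let r := (PySem.List.pyRange 1 (inp.length : Int) 1).foldl
    (fun (s : List (List Int) × Int) i =>
      if PySem.List.pyGet? inp i = PySem.List.pyGet? inp (i - 1)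
      then (s.1 ++ [PySem.List.slice inp (some s.2) (some i)], i)
      else s)
    ([], 0)
  r.1 ++ [PySem.List.slice inp (some r.2) none]

-- ===== PORT B =====
def split_at_dupes_alt (inp : List Int) : List (List Int) :=
  let s := inp.foldl
    (fun (s : List (List Int) × List Int) x =>
      if s.2 ≠ [] ∧ s.2.getLast? = some x
      then (s.1 ++ [s.2], [x])
      else (s.1, s.2 ++ [x]))
    ([], [])
  s.1 ++ [s.2]

-- ===== PRECONDITION & SPEC =====
def Spec_split_at_dupes (inp : List Int) (out : List (List Int)) : Prop := out = split_at_dupes_alt inp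
instance (inp : List Int) (out : List (List Int)) : Decidable (Spec_split_at_dupes inp out) := by unfold Spec_split_at_dupes; infer_instance

-- ===== CLAIM (what is proved, stated in full; the proofs are below) =====
def Claim_equal_split_at_dupes : Prop := ∀ (inp : List Int), Dom_split_at_dupes inp → Spec_split_at_dupes inp (split_at_dupes inp)

-- ===== LEMMAS AND PROOFS =====

-- the pending segment inp[oldi:k] (oldi < k ≤ n) is nonempty and ends with inp[k-1]
theorem pending_getLast? (inp : List Int) (oldi k : Nat) (h1 : oldi < k) (h2 : k ≤ inp.length) :
    ((inp.drop oldi).take (k - oldi)).getLast? = inp[k - 1]? := by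
  have hlen : ((inp.drop oldi).take (k - oldi)).length = k - oldi := by
    simp [List.length_take, List.length_drop]; omega
  rw [List.getLast?_eq_getElem?, hlen, List.getElem?_take_of_lt (by omega), List.getElem?_drop]
  congr 1
  omega


-- parallel-fold invariant: A's remaining index loop from state (done, oldi) computes the
-- same final list as B's remaining element loop from state (done, inp[oldi:k])
theorem loop_invariant (inp : List Int) :
    ∀ (t : List Int) (k oldi : Nat) (done : List (List Int)),
      inp.drop k = t → 1 ≤ k → k ≤ inp.length → oldi < k →
      (let r := (PySem.List.pyRange (k : Int) (inp.length : Int) 1).foldl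
          (fun (s : List (List Int) × Int) i =>
            if PySem.List.pyGet? inp i = PySem.List.pyGet? inp (i - 1)
            then (s.1 ++ [PySem.List.slice inp (some s.2) (some i)], i)
            else s)
          (done, (oldi : Int));
        r.1 ++ [PySem.List.slice inp (some r.2) none])
      = (let s := t.foldl
          (fun (s : List (List Int) × List Int) x =>
            if s.2 ≠ [] ∧ s.2.getLast? = some x
            then (s.1 ++ [s.2], [x])
            else (s.1, s.2 ++ [x]))
          (done, (inp.drop oldi).take (k - oldi));
        s.1 ++ [s.2]) := by
  intro t
  induction t with
  | nil =>
      intro k oldi done hdrop hk1 hk2 holdi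
      have hk : k = inp.length := by
        have := congrArg List.length hdrop
        simp [List.length_drop] at this
        omega
      subst hk
      rw [PySem.List.pyRange_one_eq_nil (le_refl _)]
      simp only [List.foldl_nil]
      rw [PySem.List.slice_from_natCast]
      congr 1
      rw [List.take_of_length_le (by simp)]
  | cons x t' ih =>
      intro k oldi done hdrop hk1 hk2 holdi
      have hklt : k < inp.length := by
        have := congrArg List.length hdrop
        simp [List.length_drop] at this
        omega
      have hx : inp[k]? = some x := by
        have : (inp.drop k)[0]? = some x := by rw [hdrop]; rfl
        rwa [List.getElem?_drop, Nat.add_zero] at this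
      have hxk : inp[k]'hklt = x := by
        have := hx; rw [List.getElem?_eq_getElem hklt] at this; exact Option.some.inj this
      have hdrop' : inp.drop (k + 1) = t' := by
        have : (inp.drop k).tail = t' := by rw [hdrop]; rfl
        rwa [List.tail_drop] at this
      rw [PySem.List.pyRange_one_cons (by exact_mod_cast hklt)]
      simp only [List.foldl_cons]
      -- A's test at index k ↔ B's test at element x
      have hA : (PySem.List.pyGet? inp (k : Int) = PySem.List.pyGet? inp ((k : Int) - 1))
          ↔ (inp[k - 1]? = some x) := by
        have h1 : ((k : Int) - 1) = ((k - 1 : Nat) : Int) := by omega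
        rw [h1, PySem.List.pyGet?_natCast, PySem.List.pyGet?_natCast, hx]
        constructor
        · intro h; exact h.symm
        · intro h; exact h.symm
      have hB : ((inp.drop oldi).take (k - oldi) ≠ [] ∧
            ((inp.drop oldi).take (k - oldi)).getLast? = some x)
          ↔ (inp[k - 1]? = some x) := by
        rw [pending_getLast? inp oldi k holdi (le_of_lt hklt)]
        constructor
        · exact fun h => h.2
        · intro h
          refine ⟨?_, h⟩
          intro hnil
          have := congrArg List.length hnil
          simp [List.length_take, List.length_drop] at this
          omega
      by_cases hdup : inp[k - 1]? = some x
      · rw [if_pos (hA.mpr hdup), if_pos (hB.mpr hdup)]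
        have hslice : PySem.List.slice inp (some (oldi : Int)) (some (k : Int))
            = (inp.drop oldi).take (k - oldi) := PySem.List.slice_natCast inp oldi k
        rw [hslice]
        have := ih (k + 1) k (done ++ [(inp.drop oldi).take (k - oldi)]) hdrop'
          (by omega) (by omega) (by omega)
        simp only [Nat.add_sub_cancel_left] at this
        have hcur : (inp.drop k).take 1 = [x] := by rw [hdrop]; rfl
        rw [hcur] at this
        exact_mod_cast this
      · rw [if_neg (fun h => hdup (hA.mp h)), if_neg (fun h => hdup (hB.mp h))]
        have := ih (k + 1) oldi done hdrop' (by omega) (by omega) (by omega)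
        have hext : (inp.drop oldi).take (k + 1 - oldi)
            = (inp.drop oldi).take (k - oldi) ++ [x] := by
          have h1 : k + 1 - oldi = (k - oldi) + 1 := by omega
          rw [h1, List.take_add_one, List.getElem?_drop]
          have h2 : oldi + (k - oldi) = k := by omega
          rw [h2, hx]
          rfl
        rw [hext] at this
        exact this

-- ===== VERDICT (by name: the statement is the Claim_ definition above) =====
theorem split_at_dupes_spec : Claim_equal_split_at_dupes := by
  intro inp _
  show split_at_dupes inp = split_at_dupes_alt inp
  cases inp with
  | nil => rfl
  | cons x xs =>
      unfold split_at_dupes split_at_dupes_alt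
      simp only [List.foldl_cons, if_neg (by simp : ¬(([] : List Int) ≠ [] ∧ ([] : List Int).getLast? = some x))]
      have := loop_invariant (x :: xs) xs 1 0 [] rfl (le_refl 1) (by simp) (by omega)
      simp only [List.drop_zero] at this ⊢
      convert this using 3
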